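-- pv_equiv track=rewrite | github.com/neutrak/py3_markov | confuseus.py | user_mode_symbols_to_letters
-- ===== SOURCE A (Python) =====
-- def user_mode_letter(user_mode_symbol):
-- 	#channel ops
-- 	if(user_mode_symbol=='@'):
-- 		return 'o'
-- 	#half channel ops
-- 	elif(user_mode_symbol=='%'):
-- 		return 'h'
-- 	#voice
-- 	elif(user_mode_symbol=='+'):
-- 		return 'v'
-- 	return ''
--
-- def user_mode_symbols_to_letters(nick_with_mode_symbols):
-- 	user_mode_symbols=nick_with_mode_symbols
-- 	user_mode_letters=''
-- 	idx=0
-- 	while((idx<len(user_mode_symbols)) and (user_mode_letter(user_mode_symbols[idx])!='')):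
-- 		user_mode_letters=user_mode_letter(user_mode_symbols[idx])
-- 		idx+=1
--
-- 	#2nd return value is the user nick, when this is used on a nick string
-- 	nick_sans_mode=(user_mode_symbols[idx:] if (idx<len(user_mode_symbols)) else '')
-- 	return user_mode_letters,nick_sans_mode
-- ===== SOURCE B (Python) =====
-- MODE_MAP = {'@': 'o', '%': 'h', '+': 'v'}
--
-- def user_mode_symbols_to_letters(nick_with_mode_symbols):
--     s = nick_with_mode_symbols
--     if s and s[0] in MODE_MAP:
--         letters, rest = user_mode_symbols_to_letters(s[1:])
--         return (letters if letters else MODE_MAP[s[0]], rest)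
--     return ('', s)
-- ===== Notes on version B (the rewrite author's own statement) =====
-- stated objective: alternative
-- what changed: Replaces A's iterative while-loop with an accumulator by structural recursion on the string: recurse past the first mode symbol and combine on the way back up (the deepest mapped symbol wins, reproducing A's keep-last-letter overwrite), base case returning ('', remainder).
import Mathlib
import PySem

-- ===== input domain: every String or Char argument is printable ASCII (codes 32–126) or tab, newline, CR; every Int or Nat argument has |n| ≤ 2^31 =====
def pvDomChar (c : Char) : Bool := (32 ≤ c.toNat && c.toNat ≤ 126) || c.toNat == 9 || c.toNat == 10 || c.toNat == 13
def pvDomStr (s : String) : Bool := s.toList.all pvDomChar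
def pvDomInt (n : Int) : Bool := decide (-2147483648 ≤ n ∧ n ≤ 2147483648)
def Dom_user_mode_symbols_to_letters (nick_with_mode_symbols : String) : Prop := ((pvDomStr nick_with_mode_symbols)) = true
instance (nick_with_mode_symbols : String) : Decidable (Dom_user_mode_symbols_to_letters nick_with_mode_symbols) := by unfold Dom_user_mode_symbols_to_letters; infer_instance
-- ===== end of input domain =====

-- B replaces A's iterative while-loop with structural recursion on the string, combining results
-- on the way back up (deepest mapped symbol wins, i.e. A's keep-last overwrite); objective: alternative.
-- ===== PORT A =====
def user_mode_letter (c : Char) : String :=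
  if c = '@' then "o"
  else if c = '%' then "h"
  else if c = '+' then "v"
  else ""

-- A's while loop: advancing idx over the string = consuming the list head; the accumulator is
-- user_mode_letters, and the stop state returns the remaining suffix (= user_mode_symbols[idx:],
-- which is also '' exactly when idx = len).
def umstlLoop : List Char → String → String × List Char
  | [], letters => (letters, [])
  | c :: rest, letters =>
    if user_mode_letter c ≠ "" then umstlLoop rest (user_mode_letter c)
    else (letters, c :: rest)

def user_mode_symbols_to_letters (nick_with_mode_symbols : String) : String × String :=
  let r := umstlLoop nick_with_mode_symbols.toList ""
  (r.1, String.ofList r.2)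

-- ===== PORT B =====
def MODE_MAP : PySem.Dict Char String := PySem.Dict.ofList [('@', "o"), ('%', "h"), ('+', "v")]

-- Source B's recursion: 's and s[0] in MODE_MAP' = head is a key of MODE_MAP; recurse on s[1:],
-- 'letters if letters else MODE_MAP[s[0]]' keeps the deeper result when non-empty.
def umstlRec : List Char → String × List Char
  | [] => ("", [])
  | c :: rest =>
    match MODE_MAP.get? c with
    | some l =>
      let r := umstlRec rest
      (if r.1 ≠ "" then r.1 else l, r.2)
    | none => ("", c :: rest)

def user_mode_symbols_to_letters_alt (nick_with_mode_symbols : String) : String × String :=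
  let r := umstlRec nick_with_mode_symbols.toList
  (r.1, String.ofList r.2)

-- ===== PRECONDITION & SPEC =====
def Spec_user_mode_symbols_to_letters (nick_with_mode_symbols : String) (out : String × String) : Prop := out = user_mode_symbols_to_letters_alt nick_with_mode_symbols
instance (nick_with_mode_symbols : String) (out : String × String) : Decidable (Spec_user_mode_symbols_to_letters nick_with_mode_symbols out) := by unfold Spec_user_mode_symbols_to_letters; infer_instance

-- ===== CLAIM =====
def Claim_equal_user_mode_symbols_to_letters : Prop := ∀ (nick_with_mode_symbols : String), Dom_user_mode_symbols_to_letters nick_with_mode_symbols → Spec_user_mode_symbols_to_letters nick_with_mode_symbols (user_mode_symbols_to_letters nick_with_mode_symbols)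

-- ===== LEMMAS AND PROOFS =====

theorem mode_map_get (c : Char) :
    MODE_MAP.get? c = if user_mode_letter c = "" then none else some (user_mode_letter c) := by
  by_cases h1 : c = '@'
  · subst h1; decide
  · by_cases h2 : c = '%'
    · subst h2; decide
    · by_cases h3 : c = '+'
      · subst h3; decide
      · have hm : MODE_MAP = PySem.Dict.mk [('@', "o"), ('%', "h"), ('+', "v")] := by decide
        rw [hm]
        have g1 : ¬('@' = c) := fun h => h1 h.symm
        have g2 : ¬('%' = c) := fun h => h2 h.symm
        have g3 : ¬('+' = c) := fun h => h3 h.symm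
        simp [g1, g2, g3, h1, h2, h3, user_mode_letter, PySem.Dict.get?]

theorem umstlLoop_eq_rec (cs : List Char) (letters : String) :
    umstlLoop cs letters =
      (if (umstlRec cs).1 = "" then letters else (umstlRec cs).1, (umstlRec cs).2) := by
  induction cs generalizing letters with
  | nil => simp [umstlLoop, umstlRec]
  | cons c rest ih =>
    rw [umstlLoop, umstlRec, mode_map_get c]
    by_cases h : user_mode_letter c = ""
    · simp [h]
    · rw [if_pos h, ih]
      by_cases hr : (umstlRec rest).1 = "" <;> simp [h, hr]

-- ===== VERDICT =====
theorem user_mode_symbols_to_letters_spec : Claim_equal_user_mode_symbols_to_letters := by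
  intro s _
  unfold Spec_user_mode_symbols_to_letters user_mode_symbols_to_letters
    user_mode_symbols_to_letters_alt
  rw [umstlLoop_eq_rec]
  by_cases hr : (umstlRec s.toList).1 = "" <;> simp [hr]
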